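-- pv_equiv track=rewrite | github.com/ShaunCleanCode/Algorithms | NEXON/two_problem2.py | count_mex
-- ===== SOURCE A (Python) =====
-- from collections import Counter
--
-- def count_mex(arr, l, r):
--     mex_counts = Counter()
--
--     # 모든 숫자를 추적하며 각 숫자의 빈도수를 센다.
--     number_freq = Counter(arr)
--
--     # MEX 계산을 위해 필요한 숫자의 집합을 만든다.
--     needed_numbers = set(range(r + 1))  # MEX는 최대 r이 될 수 있다.
--
--     # 수열을 순회하며 MEX를 계산한다.
--     for end in range(len(arr) + 1):
--         for start in range(end + 1):
--             current_numbers = set(arr[start:end])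
--             # MEX는 needed_numbers 중 current_numbers에 없는 가장 작은 수이다.
--             mex = min(needed_numbers - current_numbers)
--             if l <= mex <= r:
--                 mex_counts[mex] += 1
--
--     # MEX가 l과 r 사이에 있는 부분수열의 총 개수를 반환한다.
--     return sum(mex_counts[mex] for mex in range(l, r + 1))
-- ===== SOURCE B (Python) =====
-- def count_mex(arr, l, r):
--     # Incremental MEX per start: one pass over ends, maintaining the seen-set
--     # and advancing the mex pointer, instead of recomputing min over a set
--     # difference for every (start, end) pair.
--     if r < 0:
--         return 0
--     n = len(arr)
--     total = 0
--     for start in range(n + 1):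
--         if l <= 0:  # empty subarray arr[start:start] has MEX 0 (and 0 <= r here)
--             total += 1
--         seen = set()
--         mex = 0
--         for end in range(start, n):
--             seen.add(arr[end])
--             while mex in seen:
--                 mex += 1
--             if l <= mex <= r:
--                 total += 1
--     return total
-- ===== Notes on version B (the rewrite author's own statement) =====
-- stated objective: faster
-- what changed: Replaces the per-pair recomputation of min over the set difference {0..r} minus set(arr[start:end]) by a per-start sweep that maintains the seen-set and a monotone mex pointer incrementally, and drops the Counter/range-sum bookkeeping for a single running total.
import Mathlib
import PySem

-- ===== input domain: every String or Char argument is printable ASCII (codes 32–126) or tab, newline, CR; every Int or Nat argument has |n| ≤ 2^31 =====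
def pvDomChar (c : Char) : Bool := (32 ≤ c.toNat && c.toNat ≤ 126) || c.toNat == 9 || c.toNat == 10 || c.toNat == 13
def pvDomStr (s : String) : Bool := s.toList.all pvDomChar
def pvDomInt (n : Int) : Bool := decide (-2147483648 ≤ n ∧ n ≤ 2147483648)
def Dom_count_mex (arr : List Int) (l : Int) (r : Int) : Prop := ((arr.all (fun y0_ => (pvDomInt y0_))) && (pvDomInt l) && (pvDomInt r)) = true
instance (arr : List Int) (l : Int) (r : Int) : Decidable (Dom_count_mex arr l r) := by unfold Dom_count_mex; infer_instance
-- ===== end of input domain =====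

-- B replaces A's per-pair "min over ({0..r} minus set(arr[start:end]))" recomputation by a per-start
-- sweep maintaining the seen-set and a monotone mex pointer incrementally (objective: faster, measured).


-- ===== PORT A =====
def count_mex (arr : List Int) (l : Int) (r : Int) : Int :=
  let _number_freq := PySem.Dict.counter arr            -- Counter(arr): computed and unused, as in A
  let needed := PySem.Set.ofList (PySem.List.pyRange 0 (r + 1) 1)
  let mex_counts :=
    (PySem.List.pyRange 0 (PySem.List.len arr + 1) 1).foldl
      (fun d e =>
        (PySem.List.pyRange 0 (e + 1) 1).foldl
          (fun d s =>
            let current := PySem.Set.ofList (PySem.List.slice arr (some s) (some e))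
            -- Python's min(...) raises ValueError on an empty set; Pre_count_mex excludes exactly
            -- those inputs, so the .getD 0 default is never the value used inside Pre_count_mex
            let mex := (PySem.List.min? (PySem.Set.diff needed current) (fun x => x)).getD 0
            if l ≤ mex ∧ mex ≤ r then d.modify mex 0 (· + 1) else d)
          d)
      (PySem.Dict.empty (κ := Int) (ν := Int))
  ((PySem.List.pyRange l (r + 1) 1).map (fun m => mex_counts.getD m 0)).sum

-- ===== PORT B =====
-- the 'while mex in seen: mex += 1' loop of Source B; fuel seen.length + 1 provably suffices
def advanceMex (seen : PySem.Set Int) : Int → Nat → Int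
  | m, 0 => m
  | m, fuel + 1 => if PySem.Set.contains seen m then advanceMex seen (m + 1) fuel else m

def count_mex_alt (arr : List Int) (l : Int) (r : Int) : Int :=
  if r < 0 then 0
  else
    let n := PySem.List.len arr
    (PySem.List.pyRange 0 (n + 1) 1).foldl
      (fun total s =>
        let total := if l ≤ 0 then total + 1 else total
        ((PySem.List.pyRange s n 1).foldl
            (fun (st : PySem.Set Int × Int × Int) e =>
              let seen := PySem.Set.add st.1 (PySem.List.pyGetD arr e 0)
              let mex := advanceMex seen st.2.1 (seen.length + 1)
              let total := if l ≤ mex ∧ mex ≤ r then st.2.2 + 1 else st.2.2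
              (seen, mex, total))
            (PySem.Set.empty, 0, total)).2.2)
      0

-- ===== PRECONDITION & SPEC =====
-- Pre_ excludes exactly the inputs where A raises ValueError (min of an empty set):
-- r < 0, or arr containing every value of 0..r (then the full array's subarray makes the set difference empty).
-- (the first disjunct is the pigeonhole shortcut: more needed values than elements ⇒ one is missing;
-- it makes the condition decidable without materialising range(r+1) for large r)
def Pre_count_mex (arr : List Int) (l : Int) (r : Int) : Prop :=
  0 ≤ r ∧ (((arr.length : Int) ≤ r) ∨ ∃ v ∈ PySem.List.pyRange 0 (r + 1) 1, v ∉ arr)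
instance (arr : List Int) (l : Int) (r : Int) : Decidable (Pre_count_mex arr l r) := by
  unfold Pre_count_mex; infer_instance

def pvWitness_count_mex : List Int × Int × Int := ([0, 1], 0, 2)

def Spec_count_mex (arr : List Int) (l : Int) (r : Int) (out : Int) : Prop := out = count_mex_alt arr l r
instance (arr : List Int) (l : Int) (r : Int) (out : Int) : Decidable (Spec_count_mex arr l r out) := by
  unfold Spec_count_mex; infer_instance

-- ===== CLAIM (what is proved, stated in full; the proofs are below) =====
def Claim_equal_count_mex : Prop := ∀ (arr : List Int) (l : Int) (r : Int), Dom_count_mex arr l r → Pre_count_mex arr l r → Spec_count_mex arr l r (count_mex arr l r)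

-- ===== LEMMAS AND PROOFS =====

-- the MEX of a list of integers: least natural number not in the list
lemma pv_mex_exists (t : List Int) : ∃ k : Nat, ((k : Int) ∉ t) := by
  refine ⟨(t.map Int.toNat).sum + 1, fun hmem => ?_⟩
  have h1 : (((t.map Int.toNat).sum + 1 : Nat) : Int) ≤ (((t.map Int.toNat).sum + 1 : Nat) : Int).toNat := by
    simp
  have h2 : (((t.map Int.toNat).sum + 1 : Nat) : Int).toNat ≤ (t.map Int.toNat).sum := by
    exact List.single_le_sum (by simp) _ (List.mem_map_of_mem hmem)
  omega

def pvMex (t : List Int) : Nat := Nat.find (pv_mex_exists t)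

lemma pvMex_not_mem (t : List Int) : ((pvMex t : Int)) ∉ t := Nat.find_spec (pv_mex_exists t)

lemma pvMex_min (t : List Int) {j : Nat} (h : j < pvMex t) : ((j : Int)) ∈ t := by
  have := Nat.find_min (pv_mex_exists t) h
  simpa using this

lemma pvMex_eq (t : List Int) (k : Nat) (hk : ((k : Int)) ∉ t) (hlt : ∀ j < k, ((j : Int)) ∈ t) :
    pvMex t = k := by
  have h1 : pvMex t ≤ k := Nat.find_le hk
  rcases Nat.lt_or_ge (pvMex t) k with h | h
  · exact absurd (hlt _ h) (pvMex_not_mem t)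
  · omega

lemma pvMex_nil : pvMex [] = 0 := pvMex_eq [] 0 (by simp) (by omega)

lemma pvMex_le_of_notmem (t : List Int) (v : Int) (h0 : 0 ≤ v) (hnm : v ∉ t) :
    (pvMex t : Int) ≤ v := by
  by_contra h
  push_neg at h
  have hv : v = ((v.toNat : Nat) : Int) := by omega
  have : v.toNat < pvMex t := by omega
  exact hnm (hv ▸ pvMex_min t this)

lemma pvMex_le_length (t : List Int) : pvMex t ≤ t.length := by
  have hsub : (List.range (pvMex t)).map (Nat.cast : Nat → Int) ⊆ t := by
    intro x hx
    rw [List.mem_map] at hx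
    obtain ⟨j, hj, rfl⟩ := hx
    exact pvMex_min t (List.mem_range.mp hj)
  have hnd : ((List.range (pvMex t)).map (Nat.cast : Nat → Int)).Nodup :=
    List.Nodup.map Nat.cast_injective List.nodup_range
  have key : ∀ (L : List Int), L.Nodup → L ⊆ t → L.length ≤ t.length := by
    intro L hLnd hLsub
    calc L.length = L.toFinset.card := (List.toFinset_card_of_nodup hLnd).symm
      _ ≤ t.toFinset.card := Finset.card_le_card (by
          intro x hx; rw [List.mem_toFinset] at hx ⊢; exact hLsub hx)
      _ ≤ t.length := t.toFinset_card_le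
  have := key _ hnd hsub
  simpa using this

-- the while loop of Source B computes the MEX, given everything below the start value is seen
lemma advance_spec : ∀ (fuel : Nat) (seen : PySem.Set Int) (m0 : Nat),
    (∀ j < m0, ((j : Int) ∈ seen)) → pvMex seen < m0 + fuel →
    advanceMex seen (m0 : Int) fuel = (pvMex seen : Int) := by
  intro fuel
  induction fuel with
  | zero =>
    intro seen m0 h0 hf
    have : m0 ≤ pvMex seen := by
      by_contra h
      push_neg at h
      exact (pvMex_not_mem seen) (h0 _ h)
    omega
  | succ f ih =>
    intro seen m0 h0 hf
    have hm0 : m0 ≤ pvMex seen := by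
      by_contra h
      push_neg at h
      exact (pvMex_not_mem seen) (h0 _ h)
    show advanceMex seen (m0 : Int) (f + 1) = _
    rw [advanceMex]
    by_cases hc : ((m0 : Int) ∈ seen)
    · rw [if_pos ((PySem.Set.contains_iff seen _).mpr hc)]
      have hne : pvMex seen ≠ m0 := fun h => (h ▸ pvMex_not_mem seen) hc
      have : ((m0 : Int) + 1) = (((m0 + 1 : Nat)) : Int) := by push_cast; ring
      rw [this]
      exact ih seen (m0 + 1)
        (fun j hj => by rcases Nat.lt_or_ge j m0 with h | h
                        · exact h0 _ h
                        · have : j = m0 := by omega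
                          exact this ▸ hc)
        (by omega)
    · rw [if_neg (by simpa [PySem.Set.contains_iff] using hc)]
      have : pvMex seen = m0 := pvMex_eq seen m0 hc (fun j hj => h0 _ hj)
      rw [this]

lemma advance_call (seen : PySem.Set Int) (m0 : Nat)
    (h0 : ∀ j < m0, ((j : Int) ∈ seen)) :
    advanceMex seen (m0 : Int) (seen.length + 1) = (pvMex seen : Int) :=
  advance_spec _ seen m0 h0 (by have := pvMex_le_length seen; omega)

-- the subarray arr[s:e] and the counting predicate shared by both characterizations
def subA (arr : List Int) (s e : Nat) : List Int := (arr.drop s).take (e - s)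

abbrev pvCond (arr : List Int) (l r : Int) (s e : Nat) : Prop :=
  l ≤ (pvMex (subA arr s e) : Int) ∧ (pvMex (subA arr s e) : Int) ≤ r

def pvCnt (arr : List Int) (l r : Int) (s e : Nat) : Int := if pvCond arr l r s e then 1 else 0

lemma subA_self (arr : List Int) (s : Nat) : subA arr s s = [] := by simp [subA]

lemma subA_snoc (arr : List Int) (s e : Nat) (hse : s ≤ e) (he : e < arr.length) :
    subA arr s (e + 1) = subA arr s e ++ [arr[e]] := by
  unfold subA
  have h1 : e + 1 - s = (e - s) + 1 := by omega
  rw [h1, List.take_add_one, List.getElem?_drop]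
  have h2 : s + (e - s) = e := by omega
  rw [h2, List.getElem?_eq_getElem he]
  rfl

lemma subA_subset (arr : List Int) (s e : Nat) : ∀ x ∈ subA arr s e, x ∈ arr := by
  intro x hx
  exact List.mem_of_mem_drop (List.mem_of_mem_take hx)

-- ---- A-side characterization ----

lemma pvMex_ofList (t : List Int) : pvMex (PySem.Set.ofList t) = pvMex t := by
  apply pvMex_eq
  · rw [PySem.Set.mem_ofList]; exact pvMex_not_mem t
  · intro j hj
    rw [PySem.Set.mem_ofList]
    exact pvMex_min t hj

lemma A_mex_eq (arr : List Int) (r : Int) (v : Int) (hv0 : 0 ≤ v) (hvr : v ≤ r) (hva : v ∉ arr)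
    (t : List Int) (ht : ∀ x ∈ t, x ∈ arr) :
    (PySem.List.min? (PySem.Set.diff (PySem.Set.ofList (PySem.List.pyRange 0 (r + 1) 1))
        (PySem.Set.ofList t)) (fun x => x)).getD 0 = (pvMex t : Int) := by
  set D := PySem.Set.diff (PySem.Set.ofList (PySem.List.pyRange 0 (r + 1) 1)) (PySem.Set.ofList t) with hD
  have hmle : (pvMex t : Int) ≤ v := pvMex_le_of_notmem t v hv0 (fun h => hva (ht _ h))
  have hmD : (pvMex t : Int) ∈ D := by
    rw [hD, PySem.Set.mem_diff]
    constructor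
    · rw [PySem.Set.mem_ofList, PySem.List.mem_pyRange_one]
      constructor
      · positivity
      · omega
    · rw [PySem.Set.mem_ofList]; exact pvMex_not_mem t
  have hne : D ≠ [] := fun h => by rw [h] at hmD; exact (List.not_mem_nil) hmD
  obtain ⟨mu, hmu⟩ : ∃ mu, PySem.List.min? D (fun x => x) = some mu := by
    cases hmin : PySem.List.min? D (fun x => x) with
    | none => exact absurd ((PySem.List.min?_eq_none_iff D (fun x => x)).mp hmin) hne
    | some mu => exact ⟨mu, rfl⟩
  have hmuD : mu ∈ D := PySem.List.min?_mem hmu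
  have hmule : mu ≤ (pvMex t : Int) := PySem.List.min?_isMin hmu _ hmD
  have hmu0 : 0 ≤ mu ∧ mu ∉ t := by
    rw [hD, PySem.Set.mem_diff, PySem.Set.mem_ofList, PySem.Set.mem_ofList,
      PySem.List.mem_pyRange_one] at hmuD
    exact ⟨hmuD.1.1, hmuD.2⟩
  have hlemu : (pvMex t : Int) ≤ mu := pvMex_le_of_notmem t mu hmu0.1 hmu0.2
  rw [hmu]
  simp
  omega

lemma foldl_if_modify (xs : List Int) (c : Int → Prop) [DecidablePred c] (g : Int → Int)
    (d : PySem.Dict Int Int) :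
    xs.foldl (fun d s => if c s then d.modify (g s) 0 (· + 1) else d) d
    = ((xs.filter (fun s => decide (c s))).map g).foldl (fun d k => d.modify k 0 (· + 1)) d := by
  induction xs generalizing d with
  | nil => rfl
  | cons x xs ih =>
    simp only [List.foldl_cons, List.filter_cons]
    by_cases hc : c x
    · rw [if_pos hc, if_pos (by simpa using hc)]
      simp [ih]
    · rw [if_neg hc, if_neg (by simpa using hc)]
      exact ih d

lemma sum_ind_one (R : List Int) (x : Int) (hnd : R.Nodup) (hx : x ∈ R) :
    (R.map (fun m => if x = m then (1 : Int) else 0)).sum = 1 := by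
  induction R with
  | nil => simp at hx
  | cons y R' ih =>
    rcases List.nodup_cons.mp hnd with ⟨hy, hnd'⟩
    by_cases hxy : x = y
    · subst hxy
      have hz : ((R'.map (fun m => if x = m then (1 : Int) else 0)).sum) = 0 := by
        apply List.sum_eq_zero
        intro z hz
        rw [List.mem_map] at hz
        obtain ⟨m, hm, rfl⟩ := hz
        exact if_neg (fun h => hy (by rw [h]; exact hm))
      simp [hz]
    · have hx' : x ∈ R' := by rcases List.mem_cons.mp hx with h | h; exact absurd h hxy; exact h
      simp only [List.map_cons, List.sum_cons, if_neg hxy]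
      rw [ih hnd' hx']; ring

lemma sum_count_eq_length (R : List Int) (xs : List Int) (hnd : R.Nodup)
    (hall : ∀ x ∈ xs, x ∈ R) :
    (R.map (fun m => ((xs.count m : Nat) : Int))).sum = (xs.length : Int) := by
  induction xs with
  | nil => simp
  | cons x xs ih =>
    have hx : x ∈ R := hall x (by simp)
    have hall' : ∀ y ∈ xs, y ∈ R := fun y hy => hall y (by simp [hy])
    have hstep : ∀ m : Int, (((x :: xs).count m : Nat) : Int)
        = ((xs.count m : Nat) : Int) + (if x = m then (1 : Int) else 0) := by
      intro m
      by_cases h : x = m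
      · subst h; simp [List.count_cons]
      · simp only [List.count_cons, beq_iff_eq,
          if_neg (show ¬ m = x from fun hh => h hh.symm), if_neg h]
        push_cast; ring
    calc (R.map (fun m => (((x :: xs).count m : Nat) : Int))).sum
        = (R.map (fun m => ((xs.count m : Nat) : Int) + (if x = m then (1:Int) else 0))).sum := by
          congr 1; exact List.map_congr_left (fun m _ => hstep m)
      _ = (R.map (fun m => ((xs.count m : Nat) : Int))).sum
          + (R.map (fun m => if x = m then (1:Int) else 0)).sum := by
          rw [← List.sum_map_add]
      _ = (xs.length : Int) + 1 := by rw [ih hall', sum_ind_one R x hnd hx]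
      _ = ((x :: xs).length : Int) := by rw [List.length_cons]; push_cast; ring

lemma list_range_map_sum (n : Nat) (f : Nat → Int) :
    ((List.range n).map f).sum = ∑ i ∈ Finset.range n, f i := by
  induction n with
  | zero => simp
  | succ k ih => rw [List.range_succ, Finset.sum_range_succ]; simp [ih]

lemma countP_range_eq_sum (N : Nat) (p : Nat → Prop) [DecidablePred p] :
    (((List.range N).countP (fun i => decide (p i)) : Nat) : Int)
    = ∑ i ∈ Finset.range N, (if p i then (1 : Int) else 0) := by
  induction N with
  | zero => simp
  | succ k ih =>
    rw [List.range_succ, List.countP_append, Finset.sum_range_succ, ← ih]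
    by_cases h : p k <;> simp [List.countP_cons, h] <;> push_cast <;> ring

-- the value A computes per pair: min over needed minus the set of the slice (0 when the set is empty)
def mexMin (arr : List Int) (r : Int) (s e : Int) : Int :=
  (PySem.List.min? (PySem.Set.diff (PySem.Set.ofList (PySem.List.pyRange 0 (r + 1) 1))
    (PySem.Set.ofList (PySem.List.slice arr (some s) (some e)))) (fun x => x)).getD 0

lemma list_range_map_sum_cast (n : Nat) (f : Nat → Nat) :
    ((((List.range n).map f).sum : Nat) : Int) = ∑ i ∈ Finset.range n, ((f i : Nat) : Int) := by
  induction n with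
  | zero => simp
  | succ k ih =>
    rw [List.range_succ, List.map_append, List.sum_append, Finset.sum_range_succ, ← ih]
    push_cast; simp

lemma A_eq_sum (arr : List Int) (l r : Int) (hPre : Pre_count_mex arr l r) :
    count_mex arr l r
    = ∑ e ∈ Finset.range (arr.length + 1), ∑ s ∈ Finset.range (e + 1), pvCnt arr l r s e := by
  obtain ⟨hr, hc⟩ := hPre
  obtain ⟨v, hv0, hvr, hnv⟩ : ∃ v : Int, 0 ≤ v ∧ v ≤ r ∧ v ∉ arr := by
    rcases hc with h | ⟨v, hv, hnv⟩
    · exact ⟨((pvMex arr : Nat) : Int), by positivity,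
        le_trans (by exact_mod_cast pvMex_le_length arr) h, pvMex_not_mem arr⟩
    · rw [PySem.List.mem_pyRange_one] at hv
      exact ⟨v, hv.1, by omega, hnv⟩
  have hmex : ∀ (s' e' : Nat), mexMin arr r (s' : Int) (e' : Int) = ((pvMex (subA arr s' e') : Nat) : Int) := by
    intro s' e'
    unfold mexMin
    rw [PySem.List.slice_natCast]
    exact A_mex_eq arr r v hv0 hvr hnv _ (subA_subset arr s' e')
  have h0 : count_mex arr l r =
      ((PySem.List.pyRange l (r + 1) 1).map (fun m =>
        ((PySem.List.pyRange 0 (PySem.List.len arr + 1) 1).foldl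
          (fun d e => (PySem.List.pyRange 0 (e + 1) 1).foldl
            (fun d s => if l ≤ mexMin arr r s e ∧ mexMin arr r s e ≤ r
              then d.modify (mexMin arr r s e) 0 (· + 1) else d) d)
          (PySem.Dict.empty (κ := Int) (ν := Int))).getD m 0)).sum := rfl
  rw [h0]
  have hfold : (PySem.List.pyRange 0 (PySem.List.len arr + 1) 1).foldl
      (fun d e => (PySem.List.pyRange 0 (e + 1) 1).foldl
        (fun d s => if l ≤ mexMin arr r s e ∧ mexMin arr r s e ≤ r
          then d.modify (mexMin arr r s e) 0 (· + 1) else d) d)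
      (PySem.Dict.empty (κ := Int) (ν := Int))
      = ((PySem.List.pyRange 0 (PySem.List.len arr + 1) 1).flatMap (fun e =>
          ((PySem.List.pyRange 0 (e + 1) 1).filter
            (fun s => decide (l ≤ mexMin arr r s e ∧ mexMin arr r s e ≤ r))).map
            (fun s => mexMin arr r s e))).foldl
          (fun d k => d.modify k 0 (· + 1)) (PySem.Dict.empty (κ := Int) (ν := Int)) := by
    rw [List.foldl_flatMap]
    apply PySem.List.foldl_congr_mem
    intro d e _
    exact foldl_if_modify (PySem.List.pyRange 0 (e + 1) 1) _ _ d
  rw [hfold]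
  set bigL := (PySem.List.pyRange 0 (PySem.List.len arr + 1) 1).flatMap (fun e =>
      ((PySem.List.pyRange 0 (e + 1) 1).filter
        (fun s => decide (l ≤ mexMin arr r s e ∧ mexMin arr r s e ≤ r))).map
        (fun s => mexMin arr r s e)) with hbigL
  have hgetD : ∀ m ∈ PySem.List.pyRange l (r + 1) 1,
      (bigL.foldl (fun d k => d.modify k 0 (· + 1)) (PySem.Dict.empty (κ := Int) (ν := Int))).getD m 0
      = ((bigL.count m : Nat) : Int) := by
    intro m _
    rw [PySem.Dict.getD_foldl_modify_add_one]
    rw [PySem.Dict.getD_empty]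
    ring
  rw [List.map_congr_left hgetD]
  have hall : ∀ x ∈ bigL, x ∈ PySem.List.pyRange l (r + 1) 1 := by
    intro x hx
    rw [hbigL, List.mem_flatMap] at hx
    obtain ⟨e, _, hx⟩ := hx
    rw [List.mem_map] at hx
    obtain ⟨s0, hs0, rfl⟩ := hx
    rw [List.mem_filter] at hs0
    have hc := of_decide_eq_true hs0.2
    rw [PySem.List.mem_pyRange_one]
    omega
  rw [sum_count_eq_length _ bigL (PySem.List.nodup_pyRange_one l (r + 1)) hall]
  rw [hbigL, List.length_flatMap]
  have hlen : PySem.List.len arr + 1 = ((arr.length + 1 : Nat) : Int) := by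
    rw [PySem.List.len_eq]; push_cast; ring
  rw [hlen, PySem.List.pyRange_zero_nat, List.map_map]
  rw [list_range_map_sum_cast]
  apply Finset.sum_congr rfl
  intro e he
  show ((((PySem.List.pyRange 0 (Int.ofNat e + 1) 1).filter
      (fun s => decide (l ≤ mexMin arr r s (Int.ofNat e) ∧ mexMin arr r s (Int.ofNat e) ≤ r))).map
      (fun s => mexMin arr r s (Int.ofNat e))).length : Int) = _
  rw [List.length_map, ← List.countP_eq_length_filter]
  rw [show (Int.ofNat e + 1) = ((e + 1 : Nat) : Int) from by simp [Int.ofNat_eq_natCast]]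
  rw [PySem.List.pyRange_zero_nat, List.countP_map]
  rw [List.countP_congr (q := fun s' => decide (pvCond arr l r s' e)) (by
    intro s' _
    simp only [Function.comp_apply, decide_eq_true_eq]
    show (l ≤ mexMin arr r ((s' : Nat) : Int) ((e : Nat) : Int)
      ∧ mexMin arr r ((s' : Nat) : Int) ((e : Nat) : Int) ≤ r) ↔ _
    unfold pvCond
    rw [hmex s' e])]
  rw [countP_range_eq_sum (e + 1) (fun s' => pvCond arr l r s' e)]
  apply Finset.sum_congr rfl
  intro s' _
  rfl

-- ---- B-side characterization ----

def stepB (arr : List Int) (l r : Int) (st : PySem.Set Int × Int × Int) (e : Int) :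
    PySem.Set Int × Int × Int :=
  let seen := PySem.Set.add st.1 (PySem.List.pyGetD arr e 0)
  let mex := advanceMex seen st.2.1 (seen.length + 1)
  let total := if l ≤ mex ∧ mex ≤ r then st.2.2 + 1 else st.2.2
  (seen, mex, total)

lemma ofList_append_singleton (xs : List Int) (x : Int) :
    PySem.Set.ofList (xs ++ [x]) = PySem.Set.add (PySem.Set.ofList xs) x := by
  rw [PySem.Set.ofList_eq_foldl, PySem.Set.ofList_eq_foldl, List.foldl_append]
  rfl

lemma B_inner (arr : List Int) (l r : Int) (s : Nat) :
    ∀ (k : Nat), s + k ≤ arr.length → ∀ (t0 : Int),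
    (PySem.List.pyRange (s : Int) ((s : Int) + (k : Int)) 1).foldl (stepB arr l r)
        (PySem.Set.empty, 0, t0)
    = (PySem.Set.ofList (subA arr s (s + k)), ((pvMex (subA arr s (s + k)) : Int)),
       t0 + ∑ e ∈ Finset.Icc (s + 1) (s + k), pvCnt arr l r s e) := by
  intro k
  induction k with
  | zero =>
    intro hk t0
    rw [PySem.List.pyRange_one_eq_nil (by push_cast; omega)]
    simp [subA_self, pvMex_nil, PySem.Set.empty, PySem.Set.ofList,
      Finset.Icc_eq_empty (by omega : ¬ s + 1 ≤ s + 0)]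
  | succ k ih =>
    intro hk t0
    have hk' : s + k ≤ arr.length := by omega
    have hlt : s + k < arr.length := by omega
    have hcast : (s : Int) + ((k + 1 : Nat) : Int) = ((s : Int) + (k : Int)) + 1 := by
      push_cast; ring
    rw [hcast, PySem.List.pyRange_one_succ_right (by omega : (s : Int) ≤ (s : Int) + (k : Int)),
      List.foldl_append, ih hk' t0, List.foldl_cons, List.foldl_nil]
    have hsub : subA arr s (s + (k + 1)) = subA arr s (s + k) ++ [arr[s + k]] := by
      have h1 : s + (k + 1) = (s + k) + 1 := by omega
      rw [h1, subA_snoc arr s (s + k) (by omega) hlt]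
    have hseen : PySem.Set.add (PySem.Set.ofList (subA arr s (s + k)))
        (PySem.List.pyGetD arr ((s : Int) + (k : Int)) 0)
        = PySem.Set.ofList (subA arr s (s + (k + 1))) := by
      have he : ((s : Int) + (k : Int)) = (((s + k : Nat)) : Int) := by push_cast; ring
      rw [he, PySem.List.pyGetD_natCast, List.getD_eq_getElem arr 0 hlt, hsub,
        ofList_append_singleton]
    simp only [stepB]
    rw [hseen]
    have hadv : advanceMex (PySem.Set.ofList (subA arr s (s + (k + 1))))
        ((pvMex (subA arr s (s + k)) : Int))
        ((PySem.Set.ofList (subA arr s (s + (k + 1)))).length + 1)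
        = ((pvMex (subA arr s (s + (k + 1))) : Int)) := by
      have h0 : ∀ j < pvMex (subA arr s (s + k)),
          ((j : Int) ∈ PySem.Set.ofList (subA arr s (s + (k + 1)))) := by
        intro j hj
        rw [PySem.Set.mem_ofList, hsub]
        exact List.mem_append_left _ (pvMex_min _ hj)
      have := advance_call (PySem.Set.ofList (subA arr s (s + (k + 1))))
        (pvMex (subA arr s (s + k))) h0
      rwa [pvMex_ofList] at this
    rw [hadv]
    have hIcc : ∑ e ∈ Finset.Icc (s + 1) (s + (k + 1)), pvCnt arr l r s e
        = (∑ e ∈ Finset.Icc (s + 1) (s + k), pvCnt arr l r s e)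
          + pvCnt arr l r s (s + k + 1) := by
      have h1 : s + (k + 1) = (s + k) + 1 := by omega
      rw [h1, Finset.sum_Icc_succ_top (by omega : s + 1 ≤ s + k + 1)]
    rw [hIcc]
    refine Prod.ext rfl (Prod.ext rfl ?_)
    show (if l ≤ (pvMex (subA arr s (s + (k + 1))) : Int) ∧ (pvMex (subA arr s (s + (k + 1))) : Int) ≤ r
      then (t0 + ∑ e ∈ Finset.Icc (s + 1) (s + k), pvCnt arr l r s e) + 1
      else t0 + ∑ e ∈ Finset.Icc (s + 1) (s + k), pvCnt arr l r s e) = _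
    have h1 : s + k + 1 = s + (k + 1) := by omega
    rw [h1]
    unfold pvCnt pvCond
    split_ifs <;> ring

lemma foldl_body_congr {β : Type} (l : List β) (f : Int → β → Int) (g : β → Int)
    (h : ∀ acc x, x ∈ l → f acc x = acc + g x) (a : Int) :
    l.foldl f a = a + (l.map g).sum := by
  rw [PySem.List.foldl_congr_mem l f (fun acc x => acc + g x) a h, PySem.List.foldl_add]

lemma B_eq_sum (arr : List Int) (l r : Int) (hr : 0 ≤ r) :
    count_mex_alt arr l r
    = ∑ s ∈ Finset.range (arr.length + 1),
        ((if l ≤ 0 then (1 : Int) else 0) + ∑ e ∈ Finset.Icc (s + 1) arr.length, pvCnt arr l r s e) := by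
  unfold count_mex_alt
  rw [if_neg (by omega)]
  simp only [PySem.List.len_eq]
  have hn : ((arr.length : Int) + 1) = ((arr.length + 1 : Nat) : Int) := by push_cast; ring
  rw [hn, PySem.List.pyRange_zero_nat, List.foldl_map]
  refine (foldl_body_congr (List.range (arr.length + 1)) _
    (fun j => (if l ≤ 0 then (1 : Int) else 0)
      + ∑ e ∈ Finset.Icc (j + 1) arr.length, pvCnt arr l r j e) ?_ 0).trans ?_
  · intro acc j hj
    have hjle : j ≤ arr.length := by
      have := List.mem_range.mp hj; omega
    show (List.foldl (stepB arr l r)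
        (PySem.Set.empty, 0, if l ≤ 0 then acc + 1 else acc)
        (PySem.List.pyRange ((j : Nat) : Int) ((arr.length : Nat) : Int) 1)).2.2 = _
    rw [show (((arr.length : Nat) : Int)) = ((j : Nat) : Int) + ((arr.length - j : Nat) : Int) from
      by push_cast; omega]
    rw [B_inner arr l r j (arr.length - j) (by omega)]
    have hjn : j + (arr.length - j) = arr.length := by omega
    rw [hjn]
    show (if l ≤ 0 then acc + 1 else acc) + _ = _
    split_ifs <;> ring
  · rw [zero_add, list_range_map_sum]

-- ---- the triangle swap ----

lemma triangle_swap (arr : List Int) (l r : Int) (hr : 0 ≤ r) :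
    ∑ e ∈ Finset.range (arr.length + 1), ∑ s ∈ Finset.range (e + 1), pvCnt arr l r s e
    = ∑ s ∈ Finset.range (arr.length + 1),
        ((if l ≤ 0 then (1 : Int) else 0) + ∑ e ∈ Finset.Icc (s + 1) arr.length, pvCnt arr l r s e) := by
  have hswap : ∑ e ∈ Finset.range (arr.length + 1), ∑ s ∈ Finset.range (e + 1), pvCnt arr l r s e
      = ∑ s ∈ Finset.range (arr.length + 1), ∑ e ∈ Finset.Icc s arr.length, pvCnt arr l r s e := by
    calc ∑ e ∈ Finset.range (arr.length + 1), ∑ s ∈ Finset.range (e + 1), pvCnt arr l r s e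
        = ∑ e ∈ Finset.range (arr.length + 1), ∑ s ∈ Finset.range (arr.length + 1),
            (if s ≤ e then pvCnt arr l r s e else 0) := by
          apply Finset.sum_congr rfl
          intro e he
          have he' : e ≤ arr.length := by
            have := Finset.mem_range.mp he; omega
          rw [← Finset.sum_filter]
          apply Finset.sum_congr ?_ (fun _ _ => rfl)
          ext x
          simp only [Finset.mem_range, Finset.mem_filter]
          omega
      _ = ∑ s ∈ Finset.range (arr.length + 1), ∑ e ∈ Finset.range (arr.length + 1),
            (if s ≤ e then pvCnt arr l r s e else 0) := Finset.sum_comm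
      _ = ∑ s ∈ Finset.range (arr.length + 1), ∑ e ∈ Finset.Icc s arr.length, pvCnt arr l r s e := by
          apply Finset.sum_congr rfl
          intro s hs
          rw [← Finset.sum_filter]
          apply Finset.sum_congr ?_ (fun _ _ => rfl)
          ext x
          simp only [Finset.mem_range, Finset.mem_filter, Finset.mem_Icc]
          omega
  rw [hswap]
  apply Finset.sum_congr rfl
  intro s hs
  have hins : Finset.Icc s arr.length = insert s (Finset.Icc (s + 1) arr.length) := by
    have hs' : s ≤ arr.length := by
      have := Finset.mem_range.mp hs; omega
    ext x
    simp only [Finset.mem_Icc, Finset.mem_insert]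
    omega
  rw [hins, Finset.sum_insert (by simp only [Finset.mem_Icc]; omega)]
  congr 1
  unfold pvCnt pvCond
  simp only [subA_self, pvMex_nil, Nat.cast_zero]
  by_cases hl : l ≤ 0
  · rw [if_pos ⟨hl, hr⟩, if_pos hl]
  · rw [if_neg (fun h => hl h.1), if_neg hl]


-- ===== VERDICT (by name: the statement is the Claim_ definition above) =====
theorem count_mex_spec : Claim_equal_count_mex := by
  intro arr l r _hDom hPre
  unfold Spec_count_mex
  rw [A_eq_sum arr l r hPre, B_eq_sum arr l r hPre.1, triangle_swap arr l r hPre.1]
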